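-- pv_equiv track=rewrite | github.com/Ali-Kamaly/Advent-Of-Code-2025 | day4.py | find_accessible_paper
-- ===== SOURCE A (Python) =====
-- def find_accessible_paper(data, papers_accessible = 0):
--     accessible_paper = papers_accessible
--     paper_indexes = []
--     try:
--         total_lines = len(data)
--     except TypeError:
--         return accessible_paper
--     edits = 0
--
--     for line in range(total_lines):
--         for char in range(len(data[line])):
--             if data[line][char] == "@":
--                 paper_indexes.append([line,char])
--
--     for i in paper_indexes:
--         line_num, index = i[0], i[1]
--         num_adjacent_paper = 0
--
--         try:
--             if data[line_num][index+1] == "@":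
--                 num_adjacent_paper +=1
--         except IndexError:
--             pass
--
--         try:
--             if data[line_num+1][index] == "@":
--                 num_adjacent_paper +=1
--         except IndexError:
--             pass
--
--         try:
--             if data[line_num+1][index+1] == "@":
--                 num_adjacent_paper +=1
--         except IndexError:
--             pass
--
--
--         if line_num-1>=0:
--             if data[line_num-1][index] == "@":
--                 num_adjacent_paper +=1
--             try:
--                     if data[line_num-1][index+1] == "@":
--                         num_adjacent_paper +=1
--             except IndexError:
--                 pass
--
--         try:
--             if index-1>=0:
--                 if data[line_num][index-1] == "@":
--                     num_adjacent_paper +=1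
--                 if data[line_num+1][index-1] == "@":
--                     num_adjacent_paper +=1
--         except IndexError:
--             pass
--
--         try:
--             if line_num-1>=0 and index-1>=0:
--                 if data[line_num-1][index-1] == "@":
--                     num_adjacent_paper +=1
--         except IndexError:
--             pass
--
--         if 0<=num_adjacent_paper<4:
--             accessible_paper+=1
--             data[line_num][index] = "x"
--             edits+=1
--
--     while edits!= 0 :
--         accessible_paper, edits = find_accessible_paper(data, accessible_paper)
--
--     return accessible_paper, edits
-- ===== SOURCE B (Python) =====
-- # B: batch peeling on a set of coordinates — each round removes ALL currently
-- # under-connected papers at once; confluence of peeling gives A's exact count.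
-- # Note: A mutates data in place (marks removed papers "x"); B does not mutate.
-- def find_accessible_paper(data, papers_accessible=0):
--     papers = {(i, j) for i, row in enumerate(data)
--                      for j, cell in enumerate(row) if cell == "@"}
--     removed = 0
--     while True:
--         batch = {p for p in papers
--                  if sum((p[0] + di, p[1] + dj) in papers
--                         for di in (-1, 0, 1) for dj in (-1, 0, 1)
--                         if (di, dj) != (0, 0)) < 4}
--         if not batch:
--             break
--         papers -= batch
--         removed += len(batch)
--     return papers_accessible + removed, 0
-- ===== Notes on version B (the rewrite author's own statement) =====
-- stated objective: alternative
-- what changed: A peels papers by repeated full-grid passes that mutate the grid in place (recursion + while loop re-scanning everything); B abstracts the grid once into a set of '@' coordinates and removes, in batch rounds, every paper with fewer than 4 neighbours at once — the two removal orders provably reach the same 4-core, hence the same count.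
import Mathlib
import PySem

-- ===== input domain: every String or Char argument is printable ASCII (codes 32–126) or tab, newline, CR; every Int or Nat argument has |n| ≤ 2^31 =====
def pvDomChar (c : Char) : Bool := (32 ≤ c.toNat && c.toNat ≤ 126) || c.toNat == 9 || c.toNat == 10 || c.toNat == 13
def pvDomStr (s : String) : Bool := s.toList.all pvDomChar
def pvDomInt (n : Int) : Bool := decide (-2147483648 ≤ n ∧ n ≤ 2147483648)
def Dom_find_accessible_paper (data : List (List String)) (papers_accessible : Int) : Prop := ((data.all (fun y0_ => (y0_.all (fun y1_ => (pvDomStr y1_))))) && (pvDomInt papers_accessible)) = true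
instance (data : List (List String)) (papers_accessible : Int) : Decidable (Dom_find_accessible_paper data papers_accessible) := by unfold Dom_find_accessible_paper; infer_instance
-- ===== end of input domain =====

-- B removes, in batch rounds over a coordinate set, every '@' with fewer than 4 of
-- the 8 neighbours '@' (A peels sequentially, mutating `data` in place — B does not
-- mutate; the equivalence proved here is about the return value).

-- ===== PORT A =====

-- data[i][j] as an Option (none = IndexError for nonnegative indices)
def pyCell (d : List (List String)) (i j : Nat) : Option String :=
  d[i]?.bind (fun r => r[j]?)

-- the two nested for-loops collecting paper_indexes
def paperIndexes (d : List (List String)) : List (Nat × Nat) :=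
  (List.range d.length).flatMap (fun l =>
    (List.range (d.getD l []).length).filterMap (fun c =>
      if pyCell d l c = some "@" then some (l, c) else none))

-- num_adjacent_paper for cell (l,c), following A's try/except blocks in order;
-- `none` = the one UNCAUGHT IndexError (`data[line_num-1][index]`, excluded by Pre_)
def numAdj (d : List (List String)) (l c : Nat) : Option Nat :=
  let n1 := if pyCell d l (c+1) = some "@" then 1 else 0
  let n2 := n1 + (if pyCell d (l+1) c = some "@" then 1 else 0)
  let n3 := n2 + (if pyCell d (l+1) (c+1) = some "@" then 1 else 0)
  let up : Option Nat :=
    if 1 ≤ l then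
      match pyCell d (l-1) c with
      | none => none  -- uncaught IndexError in A
      | some s => some (n3 + (if s = "@" then 1 else 0) +
          (if pyCell d (l-1) (c+1) = some "@" then 1 else 0))
    else some n3
  up.map (fun n4 =>
    let n5 := n4 + (if 1 ≤ c then
        (if pyCell d l (c-1) = some "@" then 1 else 0) +
        (if pyCell d (l+1) (c-1) = some "@" then 1 else 0) else 0)
    n5 + (if 1 ≤ l ∧ 1 ≤ c then (if pyCell d (l-1) (c-1) = some "@" then 1 else 0) else 0))

-- data[l][c] = v
def setCell (d : List (List String)) (l c : Nat) (v : String) : List (List String) :=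
  d.set l ((d.getD l []).set c v)

-- the body of A's `for i in paper_indexes` loop (0 <= num_adjacent_paper is automatic on Nat)
def passStep (st : Option (List (List String) × Int × Nat)) (p : Nat × Nat) :
    Option (List (List String) × Int × Nat) :=
  st.bind (fun dae =>
    match numAdj dae.1 p.1 p.2 with
    | none => none
    | some n => some (if n < 4 then (setCell dae.1 p.1 p.2 "x", dae.2.1 + 1, dae.2.2 + 1)
                      else dae))

-- one call of A up to (not including) the while loop: collect indexes, process them
def passA (d0 : List (List String)) (a0 : Int) :
    Option (List (List String) × Int × Nat) :=
  (paperIndexes d0).foldl passStep (some (d0, a0, 0))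

-- A's recursion / while-loop, threading the mutated grid; fuel only makes the
-- recursion structural (proved sufficient below), none = IndexError propagating
mutual
def loopA : Nat → List (List String) → Int → Option (List (List String) × Int × Nat)
  | 0, _, _ => none
  | fuel+1, d, a =>
    match passA d a with
    | none => none
    | some (d', a', e) => whileA fuel d' a' e
  termination_by fuel _ _ => fuel

def whileA : Nat → List (List String) → Int → Nat → Option (List (List String) × Int × Nat)
  | fuel, d, a, e =>
    if e = 0 then some (d, a, e)           -- while edits != 0 fails: return
    else match fuel with
      | 0 => none
      | f+1 =>
        match loopA f d a with             -- accessible_paper, edits = find_accessible_paper(data, accessible_paper)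
        | none => none
        | some (d', a', e') => whileA f d' a' e'
  termination_by fuel _ _ _ => fuel
end

def countAt (d : List (List String)) : Nat := (paperIndexes d).length

def find_accessible_paper (data : List (List String)) (papers_accessible : Int) : Int × Int :=
  match loopA (2 * countAt data + 1) data papers_accessible with
  | some (_, a, e) => (a, (e : Int))
  | none => (0, 0)   -- unreachable: the fuel is sufficient and Pre_ rules out the IndexError (proved below)

-- ===== PORT B =====

-- {(i, j) for i, row in enumerate(data) for j, cell in enumerate(row) if cell == "@"}
def papersOf (data : List (List String)) : PySem.Set (Int × Int) :=
  PySem.Set.ofList ((PySem.List.enumerate data 0).flatMap (fun ir =>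
    (PySem.List.enumerate ir.2 0).filterMap (fun jc =>
      if jc.2 = "@" then some (ir.1, jc.1) else none)))

-- the (di, dj) pairs of B's generator
def offsets : List (Int × Int) :=
  ([-1, 0, 1] : List Int).flatMap (fun di =>
    ([-1, 0, 1] : List Int).filterMap (fun dj =>
      if (di, dj) ≠ ((0 : Int), (0 : Int)) then some (di, dj) else none))

-- sum((p[0]+di, p[1]+dj) in papers for ...)
def degB (papers : PySem.Set (Int × Int)) (p : Int × Int) : Int :=
  (offsets.map (fun o => if papers.contains (p.1 + o.1, p.2 + o.2) then 1 else 0)).sum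

-- B's while-loop; fuel (one unit per round, each round removes ≥ 1 paper) only
-- makes it structural — proved sufficient below
def loopB (pa : Int) : Nat → PySem.Set (Int × Int) → Int → Int × Int
  | 0, _, removed => (pa + removed, 0)
  | fuel+1, papers, removed =>
    let batch : PySem.Set (Int × Int) := papers.filter (fun p => degB papers p < 4)
    if batch.isEmpty then (pa + removed, 0)
    else loopB pa fuel (PySem.Set.diff papers batch) (removed + (batch.length : Int))

def find_accessible_paper_alt (data : List (List String)) (papers_accessible : Int) : Int × Int :=
  let papers := papersOf data
  loopB papers_accessible (papers.length + 1) papers 0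

-- ===== PRECONDITION & SPEC =====

-- Pre_ excludes exactly the inputs where A raises an uncaught IndexError
-- (an '@' in row l+1 at a column beyond the end of the shorter row l).
def Pre_find_accessible_paper (data : List (List String)) (papers_accessible : Int) : Prop :=
  ∀ pr ∈ data.zip data.tail, ∀ c < pr.2.length, pr.2.getD c "" = "@" → c < pr.1.length

instance (data : List (List String)) (papers_accessible : Int) :
    Decidable (Pre_find_accessible_paper data papers_accessible) := by
  unfold Pre_find_accessible_paper; infer_instance

def pvWitness_find_accessible_paper : List (List String) × Int := ([["@", "."], [".", "@"]], 3)

def Spec_find_accessible_paper (data : List (List String)) (papers_accessible : Int) (out : Int × Int) : Prop := out = find_accessible_paper_alt data papers_accessible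
instance (data : List (List String)) (papers_accessible : Int) (out : Int × Int) : Decidable (Spec_find_accessible_paper data papers_accessible out) := by unfold Spec_find_accessible_paper; infer_instance

-- ===== CLAIM (what is proved, stated in full; the proofs are below) =====
def Claim_equal_find_accessible_paper : Prop := ∀ (data : List (List String)) (papers_accessible : Int), Dom_find_accessible_paper data papers_accessible → Pre_find_accessible_paper data papers_accessible → Spec_find_accessible_paper data papers_accessible (find_accessible_paper data papers_accessible)


-- ===== LEMMAS AND PROOFS =====

-- ---- the abstract peeling layer: '@' positions as a Finset, degree, 4-core ----

def adjb (p q : Int × Int) : Bool :=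
  decide (p ≠ q) && decide ((p.1 - q.1).natAbs ≤ 1) && decide ((p.2 - q.2).natAbs ≤ 1)

def deg (S : Finset (Int × Int)) (p : Int × Int) : Nat :=
  (S.filter (fun q => adjb p q = true)).card

def core (S : Finset (Int × Int)) : Finset (Int × Int) :=
  (S.powerset.filter (fun T => ∀ p ∈ T, 4 ≤ deg T p)).sup id

lemma deg_mono {S T : Finset (Int × Int)} (h : S ⊆ T) (p : Int × Int) :
    deg S p ≤ deg T p := Finset.card_le_card (Finset.filter_subset_filter _ h)

lemma closed_core (S : Finset (Int × Int)) : ∀ p ∈ core S, 4 ≤ deg (core S) p := by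
  unfold core
  apply Finset.sup_induction (p := fun T => ∀ q ∈ T, 4 ≤ deg T q)
  · simp
  · intro a ha b hb p hp
    rcases Finset.mem_union.mp hp with h | h
    · exact le_trans (ha p h) (deg_mono Finset.subset_union_left p)
    · exact le_trans (hb p h) (deg_mono Finset.subset_union_right p)
  · intro T hT
    exact (Finset.mem_filter.mp hT).2

lemma core_subset (S : Finset (Int × Int)) : core S ⊆ S := by
  rw [← Finset.le_iff_subset]
  apply Finset.sup_le
  intro T hT
  exact Finset.le_iff_subset.mpr (Finset.mem_powerset.mp (Finset.mem_filter.mp hT).1)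

lemma subset_core {S T : Finset (Int × Int)} (hTS : T ⊆ S) (hc : ∀ p ∈ T, 4 ≤ deg T p) :
    T ⊆ core S :=
  Finset.le_iff_subset.mp (Finset.le_sup (f := id) (Finset.mem_filter.mpr ⟨Finset.mem_powerset.mpr hTS, hc⟩))

lemma core_of_closed {S : Finset (Int × Int)} (h : ∀ p ∈ S, 4 ≤ deg S p) : core S = S :=
  subset_antisymm (core_subset S) (subset_core subset_rfl h)

lemma core_erase {S : Finset (Int × Int)} {p : Int × Int} (hp : p ∈ S) (hd : deg S p < 4) :
    core (S.erase p) = core S := by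
  have hpc : p ∉ core S := fun hmem =>
    absurd (le_trans (closed_core S p hmem) (deg_mono (core_subset S) p)) (by omega)
  apply subset_antisymm
  · exact subset_core ((core_subset _).trans (Finset.erase_subset _ _)) (closed_core _)
  · exact subset_core (fun q hq => Finset.mem_erase.mpr
      ⟨fun hqp => hpc (hqp ▸ hq), core_subset S hq⟩) (closed_core S)

lemma core_sdiff (B : Finset (Int × Int)) : ∀ S : Finset (Int × Int), B ⊆ S →
    (∀ p ∈ B, deg S p < 4) → core (S \ B) = core S := by
  induction B using Finset.induction_on with
  | empty => intro S _ _; simp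
  | insert p B _hp ih =>
    intro S hBS hdeg
    have hpS : p ∈ S := hBS (Finset.mem_insert_self p B)
    have h1 : S \ insert p B = (S.erase p) \ B := by
      ext q; simp [Finset.mem_sdiff, Finset.mem_erase, Finset.mem_insert]; tauto
    rw [h1, ih (S.erase p)
      (fun q hq => Finset.mem_erase.mpr ⟨fun hqp => _hp (hqp ▸ hq), hBS (Finset.mem_insert_of_mem hq)⟩)
      (fun q hq => lt_of_le_of_lt (deg_mono (Finset.erase_subset _ _) q) (hdeg q (Finset.mem_insert_of_mem hq)))]
    exact core_erase hpS (hdeg p (Finset.mem_insert_self p B))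
lemma offsets_eq : offsets = [(-1,-1),(-1,0),(-1,1),(0,-1),(0,1),(1,-1),(1,0),(1,1)] := by decide
lemma nodup_offsets : offsets.Nodup := by decide
lemma mem_offsets (o : Int × Int) :
    o ∈ offsets ↔ (¬(o.1 = 0 ∧ o.2 = 0) ∧ o.1.natAbs ≤ 1 ∧ o.2.natAbs ≤ 1) := by
  obtain ⟨a, b⟩ := o
  rw [offsets_eq]
  simp [Prod.ext_iff]
  omega

lemma deg_eq_count (S : Finset (Int × Int)) (p : Int × Int) :
    deg S p = offsets.countP (fun o => decide ((p.1 + o.1, p.2 + o.2) ∈ S)) := by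
  have hfil : ((offsets.filter (fun o => decide ((p.1 + o.1, p.2 + o.2) ∈ S))).map
      (fun o => (p.1 + o.1, p.2 + o.2))).toFinset = S.filter (fun q => adjb p q = true) := by
    ext ⟨x, y⟩
    simp only [List.mem_toFinset, List.mem_map, List.mem_filter, Finset.mem_filter,
      mem_offsets, adjb, decide_eq_true_eq, Bool.and_eq_true, Prod.ext_iff, Prod.mk.injEq]
    constructor
    · rintro ⟨⟨a, b⟩, ⟨⟨hne, h1, h2⟩, hmem⟩, hx, hy⟩
      subst hx; subst hy
      refine ⟨hmem, ⟨fun heq => hne ?_, ?_⟩, ?_⟩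
      · rw [Prod.ext_iff] at heq; simp at heq ⊢; omega
      · simp; omega
      · simp; omega
    · rintro ⟨hmem, ⟨hne, h1⟩, h2⟩
      rw [Ne, Prod.ext_iff] at hne
      refine ⟨(x - p.1, y - p.2), ⟨⟨fun hc => hne ?_, by simp; omega, by simp; omega⟩,
        by simpa using hmem⟩, by simp, by simp⟩
      simp at hc
      constructor <;> omega
  have hnd : ((offsets.filter (fun o => decide ((p.1 + o.1, p.2 + o.2) ∈ S))).map
      (fun o => (p.1 + o.1, p.2 + o.2))).Nodup := by
    refine (nodup_offsets.filter _).map ?_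
    intro a b hab
    simp only [Prod.ext_iff, Prod.mk.injEq] at hab ⊢
    constructor <;> omega
  rw [deg, ← hfil, List.toFinset_card_of_nodup hnd, List.length_map,
    ← List.countP_eq_length_filter]

-- ---- grids and their '@'-sets ----

def PA (d : List (List String)) : Finset (Int × Int) :=
  ((PySem.List.enumerate d 0).flatMap (fun ir =>
    (PySem.List.enumerate ir.2 0).filterMap (fun jc =>
      if jc.2 = "@" then some (ir.1, jc.1) else none))).toFinset

lemma pyCell_eq_some_iff {d : List (List String)} {l c : Nat} {s : String} :
    pyCell d l c = some s ↔ ∃ (hl : l < d.length) (hc : c < d[l].length), d[l][c] = s := by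
  simp [pyCell, Option.bind_eq_some_iff, List.getElem?_eq_some_iff]

lemma mem_PA {d : List (List String)} (x y : Int) :
    ((x, y) ∈ PA d) ↔ ∃ l c : Nat, x = l ∧ y = c ∧ pyCell d l c = some "@" := by
  unfold PA
  simp only [List.mem_toFinset, List.mem_flatMap, List.mem_filterMap,
    PySem.List.mem_enumerate_iff]
  constructor
  · rintro ⟨ir, ⟨l, hl, rfl⟩, jc, ⟨c, hc, rfl⟩, hif⟩
    simp only [zero_add] at hif hc
    split at hif
    · rename_i hat
      injection hif with h
      injection h with hx hy
      exact ⟨l, c, hx.symm, hy.symm, pyCell_eq_some_iff.mpr ⟨hl, hc, hat⟩⟩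
    · cases hif
  · rintro ⟨l, c, rfl, rfl, h⟩
    obtain ⟨hl, hc, hat⟩ := pyCell_eq_some_iff.mp h
    exact ⟨(0 + l, d[l]), ⟨l, hl, rfl⟩, (0 + c, d[l][c]), ⟨c, hc, rfl⟩, by simp [hat]⟩

lemma mem_PA_natCast {d : List (List String)} (l c : Nat) :
    (((l : Int), (c : Int)) ∈ PA d) ↔ pyCell d l c = some "@" := by
  rw [mem_PA]
  constructor
  · rintro ⟨l', c', hl, hc, h⟩
    rwa [Nat.cast_inj.mp hl, Nat.cast_inj.mp hc]
  · intro h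
    exact ⟨l, c, rfl, rfl, h⟩

lemma not_mem_PA_neg {d : List (List String)} {x y : Int} (h : x < 0 ∨ y < 0) :
    ((x, y) ∉ PA d) := by
  intro hmem
  obtain ⟨l, c, rfl, rfl, _⟩ := (mem_PA x y).mp hmem
  omega

lemma mem_paperIndexes {d : List (List String)} {p : Nat × Nat} :
    p ∈ paperIndexes d ↔ pyCell d p.1 p.2 = some "@" := by
  simp only [paperIndexes, List.mem_flatMap, List.mem_filterMap, List.mem_range]
  constructor
  · rintro ⟨l, hl, c, hc, hif⟩
    split at hif
    · rename_i hat
      injection hif with h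
      rw [← h]
      exact hat
    · cases hif
  · intro h
    obtain ⟨hl, hc, hat⟩ := pyCell_eq_some_iff.mp h
    refine ⟨p.1, hl, p.2, ?_, by simp [h]⟩
    rwa [List.getD_eq_getElem d [] hl]

lemma nodup_paperIndexes (d : List (List String)) : (paperIndexes d).Nodup := by
  rw [paperIndexes, List.nodup_flatMap]
  constructor
  · intro l _
    apply List.Nodup.filterMap _ (List.nodup_range)
    intro a b p hpa hpb
    split at hpa
    · split at hpb
      · cases hpa; cases hpb; rfl
      · cases hpb
    · cases hpa
  · have hfst : ∀ l (p : Nat × Nat), p ∈ (List.range (d.getD l []).length).filterMap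
        (fun c => if pyCell d l c = some "@" then some (l, c) else none) → p.1 = l := by
      intro l p hp
      obtain ⟨c, _, hif⟩ := List.mem_filterMap.mp hp
      split at hif
      · cases hif; rfl
      · cases hif
    refine List.pairwise_lt_range.imp ?_
    intro a b hab p hpa hpb
    exact absurd ((hfst a p hpa).symm.trans (hfst b p hpb)) (by omega)

lemma PA_eq_map (d : List (List String)) :
    PA d = ((paperIndexes d).map (fun p => ((p.1 : Int), (p.2 : Int)))).toFinset := by
  ext ⟨x, y⟩
  rw [mem_PA]
  simp only [List.mem_toFinset, List.mem_map]
  constructor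
  · rintro ⟨l, c, rfl, rfl, h⟩
    exact ⟨(l, c), mem_paperIndexes.mpr h, rfl⟩
  · rintro ⟨p, hp, heq⟩
    injection heq with hx hy
    exact ⟨p.1, p.2, hx.symm, hy.symm, mem_paperIndexes.mp hp⟩

-- safety of the one unguarded access data[line_num-1][index]
def SafeUp (d : List (List String)) : Prop :=
  ∀ l c, pyCell d (l+1) c = some "@" → c < (d.getD l []).length

lemma safeUp_of_pre {data : List (List String)} {pa : Int}
    (h : Pre_find_accessible_paper data pa) : SafeUp data := by
  intro l c hcell
  obtain ⟨hl1, hc, hat⟩ := pyCell_eq_some_iff.mp hcell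
  have hlt : l < (data.zip data.tail).length := by
    rw [List.length_zip, List.length_tail]; omega
  have hl : l < data.length := by omega
  have hmem : (data[l], data[l+1]) ∈ data.zip data.tail := by
    have htl : l < data.tail.length := by rw [List.length_tail]; omega
    have hg : (data.zip data.tail)[l] = (data[l], data.tail[l]'htl) := List.getElem_zip
    rw [List.getElem_tail htl] at hg
    exact hg ▸ List.getElem_mem hlt
  have := h _ hmem c hc (by rw [List.getD_eq_getElem _ _ hc]; exact hat)
  rwa [List.getD_eq_getElem data [] hl]

lemma pyCell_setCell {d : List (List String)} {l c : Nat}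
    (hl : l < d.length) (hc : c < (d.getD l []).length) (v : String) (x y : Nat) :
    pyCell (setCell d l c v) x y =
      if x = l ∧ y = c then some v else pyCell d x y := by
  have hrow : d.getD l [] = d[l] := List.getD_eq_getElem d [] hl
  rw [hrow] at hc
  by_cases hx : x = l
  · subst hx
    have e1 : (setCell d x c v)[x]? = some ((d[x]).set c v) := by
      rw [setCell, hrow]
      exact List.getElem?_set_self hl
    rw [pyCell, e1]
    show ((d[x]).set c v)[y]? = _
    by_cases hy : y = c
    · subst hy
      rw [if_pos ⟨rfl, rfl⟩, List.getElem?_set_self hc]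
    · rw [if_neg (fun h => hy h.2), List.getElem?_set_ne (fun h => hy h.symm)]
      simp [pyCell, List.getElem?_eq_getElem hl]
  · rw [if_neg (fun h => hx h.1), pyCell, pyCell, setCell,
      List.getElem?_set_ne (fun h => hx h.symm)]

lemma setCell_getD_length (d : List (List String)) (l c : Nat) (v : String) (x : Nat) :
    ((setCell d l c v).getD x []).length = ((d.getD x []).length) := by
  by_cases hx : x < d.length
  · have hx' : x < (setCell d l c v).length := by simpa [setCell] using hx
    rw [List.getD_eq_getElem _ [] hx', List.getD_eq_getElem d [] hx]
    by_cases hxl : l = x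
    · subst hxl
      rw [show (setCell d l c v)[l] = (d.getD l []).set c v from List.getElem_set_self hx']
      simp [List.length_set, List.getElem?_eq_getElem hx]
    · simp [setCell, List.getElem_set_ne hxl]
  · rw [List.getD_eq_default _ [] (by simpa [setCell] using hx),
      List.getD_eq_default d [] (by omega)]

lemma safeUp_setCell {d : List (List String)} {l c : Nat}
    (hl : l < d.length) (hc : c < (d.getD l []).length)
    (h : SafeUp d) : SafeUp (setCell d l c "x") := by
  intro x y hcell
  rw [pyCell_setCell hl hc _ _ _] at hcell
  rw [setCell_getD_length]
  split at hcell
  · exact absurd (Option.some.inj hcell) (by decide)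
  · exact h x y hcell

lemma PA_setCell {d : List (List String)} {l c : Nat}
    (h : pyCell d l c = some "@") :
    PA (setCell d l c "x") = (PA d).erase ((l : Int), (c : Int)) := by
  obtain ⟨hl, hc, _⟩ := pyCell_eq_some_iff.mp h
  have hc' : c < (d.getD l []).length := by rwa [List.getD_eq_getElem d [] hl]
  ext ⟨x, y⟩
  rw [Finset.mem_erase, mem_PA, mem_PA]
  constructor
  · rintro ⟨a, b, rfl, rfl, hcell⟩
    rw [pyCell_setCell hl hc' _ _ _] at hcell
    split at hcell
    · exact absurd (Option.some.inj hcell) (by decide)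
    · rename_i hne
      refine ⟨fun heq => hne ?_, a, b, rfl, rfl, hcell⟩
      injection heq with h1 h2
      exact ⟨Nat.cast_inj.mp h1, Nat.cast_inj.mp h2⟩
  · rintro ⟨hne, a, b, rfl, rfl, hcell⟩
    refine ⟨a, b, rfl, rfl, ?_⟩
    rw [pyCell_setCell hl hc' _ _ _, if_neg ?_]
    · exact hcell
    · rintro ⟨rfl, rfl⟩
      exact hne rfl

-- A's neighbour count is the abstract degree (under the safety precondition)
lemma numAdj_eq {d : List (List String)} {l c : Nat}
    (hS : SafeUp d) (h : pyCell d l c = some "@") :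
    numAdj d l c = some (deg (PA d) ((l : Int), (c : Int))) := by
  obtain ⟨hl, hcx, _⟩ := pyCell_eq_some_iff.mp h
  rw [deg_eq_count, offsets_eq]
  simp only [List.countP_cons, List.countP_nil, decide_eq_true_eq]
  have hcast : ∀ x y : Nat, (((x : Int), (y : Int)) ∈ PA d) = (pyCell d x y = some "@") :=
    fun x y => propext (mem_PA_natCast x y)
  by_cases hl1 : 1 ≤ l
  · -- the unguarded up access returns some
    have hup : ∃ s, pyCell d (l-1) c = some s := by
      have hsafe : c < (d.getD (l-1) []).length := by
        apply hS (l-1) c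
        rwa [Nat.sub_add_cancel hl1]
      have hll : l - 1 < d.length := by omega
      rw [List.getD_eq_getElem d [] hll] at hsafe
      exact ⟨_, pyCell_eq_some_iff.mpr ⟨hll, hsafe, rfl⟩⟩
    obtain ⟨s, hs⟩ := hup
    have em1 : ((l : Int) + -1) = ((l - 1 : Nat) : Int) := by omega
    have ep1 : ((l : Int) + 1) = ((l + 1 : Nat) : Int) := by omega
    have ec1 : ((c : Int) + 1) = ((c + 1 : Nat) : Int) := by omega
    have ec0 : ((c : Int) + 0) = ((c : Nat) : Int) := by omega
    have el0 : ((l : Int) + 0) = ((l : Nat) : Int) := by omega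
    by_cases hc1 : 1 ≤ c
    · have ecm : ((c : Int) + -1) = ((c - 1 : Nat) : Int) := by omega
      rw [numAdj, if_pos hl1, hs]
      simp only [em1, ep1, ec1, ec0, el0, ecm, hcast, hs, Option.some.injEq,
        if_pos hl1, if_pos hc1, if_pos (And.intro hl1 hc1)]
      split_ifs <;> simp only [Option.map_some, Option.some.injEq] <;> omega
    · have hc0 : c = 0 := by omega
      subst hc0
      have ecm : (((0:Nat) : Int) + -1) = (-1 : Int) := by omega
      have hnm : ∀ x : Int, ((x, (-1 : Int)) ∈ PA d) = False :=
        fun x => eq_false (not_mem_PA_neg (Or.inr (by omega)))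
      rw [numAdj, if_pos hl1, hs]
      simp only [em1, ep1, ec1, ec0, el0, ecm, hcast, hnm, hs, Option.some.injEq,
        if_neg hc1, if_false, if_neg (fun hh : 1 ≤ l ∧ 1 ≤ 0 => hc1 hh.2)]
      split_ifs <;> simp only [Option.map_some, Option.some.injEq] <;> omega
  · have hl0 : l = 0 := by omega
    subst hl0
    have em1 : (((0:Nat) : Int) + -1) = (-1 : Int) := by omega
    have hnm : ∀ y : Int, (((-1 : Int), y) ∈ PA d) = False :=
      fun y => eq_false (not_mem_PA_neg (Or.inl (by omega)))
    have ep1 : (((0:Nat) : Int) + 1) = (((0 + 1 : Nat)) : Int) := by omega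
    have ec1 : ((c : Int) + 1) = ((c + 1 : Nat) : Int) := by omega
    have ec0 : ((c : Int) + 0) = ((c : Nat) : Int) := by omega
    have el0 : (((0:Nat) : Int) + 0) = (((0:Nat)) : Int) := by omega
    by_cases hc1 : 1 ≤ c
    · have ecm : ((c : Int) + -1) = ((c - 1 : Nat) : Int) := by omega
      rw [numAdj, if_neg hl1]
      simp only [em1, ep1, ec1, ec0, el0, ecm, hcast, hnm, Option.some.injEq,
        if_pos hc1, if_false, if_neg (fun hh : 1 ≤ 0 ∧ 1 ≤ c => hl1 hh.1)]
      split_ifs <;> simp only [Option.map_some, Option.some.injEq] <;> omega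
    · have hc0 : c = 0 := by omega
      subst hc0
      have ecm : (((0:Nat) : Int) + -1) = (-1 : Int) := by omega
      have hnm2 : ∀ x : Int, ((x, (-1 : Int)) ∈ PA d) = False :=
        fun x => eq_false (not_mem_PA_neg (Or.inr (by omega)))
      rw [numAdj, if_neg hl1]
      simp only [em1, ep1, ec1, ec0, el0, ecm, hcast, hnm, hnm2, Option.some.injEq,
        if_neg hc1, if_false, if_neg (fun hh : 1 ≤ 0 ∧ 1 ≤ 0 => hl1 hh.1)]
      split_ifs <;> simp only [Option.map_some, Option.some.injEq] <;> omega

-- ---- A's pass and loop ----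

lemma pass_fold (items : List (Nat × Nat)) :
    ∀ (d : List (List String)) (a : Int) (e : Nat),
    SafeUp d → items.Nodup → (∀ p ∈ items, pyCell d p.1 p.2 = some "@") →
    ∃ d' a' e',
      items.foldl passStep (some (d, a, e)) = some (d', a', e') ∧
      SafeUp d' ∧ e ≤ e' ∧
      (PA d').card + (e' - e) = (PA d).card ∧
      a' = a + ((e' - e : Nat) : Int) ∧
      core (PA d') = core (PA d) ∧
      (∀ x y, pyCell d' x y = some "@" → pyCell d x y = some "@") ∧
      (e' = e → d' = d ∧ ∀ p ∈ items, 4 ≤ deg (PA d) ((p.1 : Int), (p.2 : Int))) := by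
  induction items with
  | nil =>
    intro d a e hS _ _
    exact ⟨d, a, e, rfl, hS, le_refl e, by simp, by simp, rfl,
      fun x y h => h, fun _ => ⟨rfl, by simp⟩⟩
  | cons p rest ih =>
    intro d a e hS hnd hall
    have hp : pyCell d p.1 p.2 = some "@" := hall p (List.mem_cons_self)
    have hnum := numAdj_eq hS hp
    have hstep : passStep (some (d, a, e)) p =
        some (if deg (PA d) ((p.1 : Int), (p.2 : Int)) < 4
              then (setCell d p.1 p.2 "x", a + 1, e + 1) else (d, a, e)) := by
      simp [passStep, hnum]
    rw [List.foldl_cons, hstep]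
    have hmemPA : ((p.1 : Int), (p.2 : Int)) ∈ PA d := (mem_PA_natCast p.1 p.2).mpr hp
    by_cases hdeg : deg (PA d) ((p.1 : Int), (p.2 : Int)) < 4
    · rw [if_pos hdeg]
      obtain ⟨hl, hcx, _⟩ := pyCell_eq_some_iff.mp hp
      have hc' : p.2 < (d.getD p.1 []).length := by rwa [List.getD_eq_getElem d [] hl]
      have hPA1 : PA (setCell d p.1 p.2 "x") = (PA d).erase ((p.1 : Int), (p.2 : Int)) :=
        PA_setCell hp
      have hS1 : SafeUp (setCell d p.1 p.2 "x") := safeUp_setCell hl hc' hS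
      have hall1 : ∀ q ∈ rest, pyCell (setCell d p.1 p.2 "x") q.1 q.2 = some "@" := by
        intro q hq
        rw [pyCell_setCell hl hc' _ _ _, if_neg]
        · exact hall q (List.mem_cons_of_mem _ hq)
        · rintro ⟨h1, h2⟩
          exact (List.nodup_cons.mp hnd).1
            (by rwa [show q = p from Prod.ext h1 h2] at hq)
      obtain ⟨d', a', e', hfold, hS', hle, hcard, ha', hcore, hmono, hzero⟩ :=
        ih (setCell d p.1 p.2 "x") (a + 1) (e + 1) hS1 (List.nodup_cons.mp hnd).2 hall1
      have hce := Finset.card_erase_of_mem hmemPA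
      have hpos : 0 < (PA d).card := Finset.card_pos.mpr ⟨_, hmemPA⟩
      refine ⟨d', a', e', hfold, hS', by omega, ?_, by omega, ?_, ?_, ?_⟩
      · rw [hPA1] at hcard; omega
      · rw [hcore, hPA1, core_erase hmemPA hdeg]
      · intro x y hxy
        have hm := hmono x y hxy
        rw [pyCell_setCell hl hc' _ _ _] at hm
        split at hm
        · exact absurd (Option.some.inj hm) (by decide)
        · exact hm
      · intro he'
        exact absurd he' (by omega)
    · rw [if_neg hdeg]
      obtain ⟨d', a', e', hfold, hS', hle, hcard, ha', hcore, hmono, hzero⟩ :=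
        ih d a e hS (List.nodup_cons.mp hnd).2 (fun q hq => hall q (List.mem_cons_of_mem _ hq))
      refine ⟨d', a', e', hfold, hS', hle, hcard, ha', hcore, hmono, ?_⟩
      intro he'
      obtain ⟨hd, hrest⟩ := hzero he'
      refine ⟨hd, ?_⟩
      intro q hq
      rcases List.mem_cons.mp hq with rfl | hq'
      · omega
      · exact hrest q hq'

lemma whileA_zero (fuel : Nat) (d : List (List String)) (a : Int) :
    whileA fuel d a 0 = some (d, a, 0) := by
  simp [whileA.eq_def]

lemma whileA_pos (f : Nat) (d : List (List String)) (a : Int) (e : Nat) (he : e ≠ 0) :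
    whileA (f + 1) d a e = match loopA f d a with
      | none => none
      | some (d', a', e') => whileA f d' a' e' := by
  conv_lhs => rw [whileA.eq_def]
  show (if e = 0 then some (d, a, e)
    else match f + 1 with
      | 0 => none
      | Nat.succ f' => match loopA f' d a with
        | none => none
        | some (d', a', e') => whileA f' d' a' e') = _
  rw [if_neg he]

lemma passA_spec (d : List (List String)) (a : Int) (hS : SafeUp d) :
    ∃ d' a' e', passA d a = some (d', a', e') ∧ SafeUp d' ∧
      (PA d').card + e' = (PA d).card ∧ a' = a + (e' : Int) ∧
      core (PA d') = core (PA d) ∧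
      (e' = 0 → d' = d ∧ ∀ p ∈ PA d, 4 ≤ deg (PA d) p) := by
  obtain ⟨d', a', e', hfold, hS', hle, hcard, ha', hcore, _, hzero⟩ :=
    pass_fold (paperIndexes d) d a 0 hS (nodup_paperIndexes d)
      (fun p hp => mem_paperIndexes.mp hp)
  refine ⟨d', a', e', hfold, hS', by omega, by omega, hcore, ?_⟩
  intro he'
  obtain ⟨hd, hall⟩ := hzero he'
  refine ⟨hd, ?_⟩
  rintro ⟨x, y⟩ hq
  obtain ⟨l, c, rfl, rfl, hcell⟩ := (mem_PA x y).mp hq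
  exact hall (l, c) (mem_paperIndexes.mpr hcell)

lemma loopA_spec : ∀ (fuel : Nat) (d : List (List String)) (a : Int), SafeUp d →
    2 * (PA d).card + 1 ≤ fuel →
    ∃ d', loopA fuel d a =
      some (d', a + (((PA d).card - (core (PA d)).card : Nat) : Int), 0) := by
  intro fuel
  induction fuel using Nat.strong_induction_on with
  | _ fuel ih =>
    intro d a hS hfuel
    match fuel, hfuel with
    | f + 1, hfuel =>
      obtain ⟨d', a', e', hpass, hS', hcard, ha', hcore, hz⟩ := passA_spec d a hS
      have hcsub : (core (PA d')).card ≤ (PA d').card :=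
        Finset.card_le_card (core_subset (PA d'))
      rcases Nat.eq_zero_or_pos e' with he0 | hpos
      · subst he0
        obtain ⟨rfl, hclosed⟩ := hz rfl
        have hcc : core (PA d') = PA d' := core_of_closed hclosed
        refine ⟨d', ?_⟩
        rw [loopA, hpass]
        show whileA f d' a' 0 = _
        rw [whileA_zero, hcc]
        simp only [Nat.sub_self, Nat.cast_zero, add_zero]
        rw [show a' = a from by omega]
      · match f, hfuel with
        | 0, hfuel => exact absurd hfuel (by omega)
        | g + 1, hfuel =>
          have hcard' : (PA d').card + e' = (PA d).card := hcard
          obtain ⟨d'', hloop⟩ := ih g (by omega) d' a' hS' (by omega)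
          refine ⟨d'', ?_⟩
          rw [loopA, hpass]
          show whileA (g + 1) d' a' e' = _
          rw [whileA_pos g d' a' e' (by omega), hloop]
          show whileA g d'' _ 0 = _
          rw [whileA_zero]
          have hcq : (core (PA d')).card = (core (PA d)).card := by rw [hcore]
          have hv : a' + (((PA d').card - (core (PA d')).card : Nat) : Int) =
              a + (((PA d).card - (core (PA d)).card : Nat) : Int) := by omega
          rw [hv]

lemma A_val (d : List (List String)) (pa : Int) (h : SafeUp d) :
    find_accessible_paper d pa = (pa + (((PA d).card - (core (PA d)).card : Nat) : Int), 0) := by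
  have hle : (PA d).card ≤ countAt d := by
    rw [PA_eq_map]
    refine le_trans (List.toFinset_card_le _) ?_
    rw [List.length_map]
    exact le_refl _
  obtain ⟨d', hloop⟩ := loopA_spec (2 * countAt d + 1) d pa h (by omega)
  rw [find_accessible_paper, hloop]
  rfl


-- ---- B's loop ----

lemma degB_eq (papers : PySem.Set (Int × Int)) (p : Int × Int) :
    degB papers p = ((deg papers.toFinset p : Nat) : Int) := by
  rw [degB, PySem.List.sum_map_ite_one_zero, deg_eq_count]
  congr 1
  refine List.countP_congr (fun o _ => ?_)
  simp [PySem.Set.contains, List.contains_eq_mem, List.mem_toFinset]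

lemma loopB_spec : ∀ (fuel : Nat) (papers : PySem.Set (Int × Int)) (pa removed : Int),
    papers.Nodup → papers.length + 1 ≤ fuel →
    loopB pa fuel papers removed =
      (pa + removed + ((papers.toFinset.card - (core papers.toFinset).card : Nat) : Int), 0) := by
  intro fuel
  induction fuel with
  | zero => intro papers pa removed _ hf; omega
  | succ fuel ih =>
    intro papers pa removed hnd hf
    rw [loopB]
    by_cases hbe : (papers.filter (fun p => degB papers p < 4)).isEmpty
    · rw [if_pos hbe]
      have hclosed : ∀ q ∈ papers.toFinset, 4 ≤ deg papers.toFinset q := by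
        intro q hq
        have hqp : q ∈ papers := List.mem_toFinset.mp hq
        by_contra hlt
        have : q ∈ papers.filter (fun p => degB papers p < 4) := by
          refine List.mem_filter.mpr ⟨hqp, ?_⟩
          rw [degB_eq]
          simp only [decide_eq_true_eq]
          omega
        rw [List.isEmpty_iff] at hbe
        simp [hbe] at this
      rw [core_of_closed hclosed]
      simp
    · rw [if_neg hbe]
      set batch := papers.filter (fun p => degB papers p < 4) with hbatch
      clear_value batch
      have hbnd : batch.Nodup := by rw [hbatch]; exact hnd.filter _
      have hmemb : ∀ x, x ∈ batch ↔ x ∈ papers ∧ degB papers x < 4 := by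
        intro x
        rw [hbatch, List.mem_filter]
        simp
      have hBsub : batch.toFinset ⊆ papers.toFinset := by
        intro x hx
        exact List.mem_toFinset.mpr ((hmemb x).mp (List.mem_toFinset.mp hx)).1
      have hdegb : ∀ q ∈ batch.toFinset, deg papers.toFinset q < 4 := by
        intro q hq
        have := ((hmemb q).mp (List.mem_toFinset.mp hq)).2
        rw [degB_eq] at this
        omega
      have hdiff : PySem.Set.diff papers batch = papers.filter (fun x => !batch.contains x) := rfl
      have htf : (PySem.Set.diff papers batch).toFinset = papers.toFinset \ batch.toFinset := by
        ext x
        rw [hdiff]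
        simp [List.mem_filter, List.mem_toFinset, Finset.mem_sdiff, List.contains_eq_mem]
      have hnd' : (PySem.Set.diff papers batch).Nodup := by rw [hdiff]; exact hnd.filter _
      have hlen : (PySem.Set.diff papers batch).length = papers.length - batch.length := by
        rw [hdiff, hbatch]
        rw [List.filter_congr (l := papers)
          (q := fun x => !(decide (degB papers x < 4))) (fun x hx => by
            simp [PySem.Set.contains, List.contains_eq_mem, List.mem_filter, hx])]
        have := List.length_eq_length_filter_add
          (l := papers) (f := fun p => decide (degB papers p < 4))
        omega
      have hblen : batch.toFinset.card = batch.length := List.toFinset_card_of_nodup hbnd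
      have hbpos : 0 < batch.length := by
        rw [List.length_pos_iff]
        intro hb
        exact hbe (List.isEmpty_iff.mpr (hbatch ▸ hb))
      have hcards : batch.toFinset.card ≤ papers.toFinset.card := Finset.card_le_card hBsub
      have hcsd : (papers.toFinset \ batch.toFinset).card
          = papers.toFinset.card - batch.toFinset.card := by
        rw [Finset.card_sdiff, Finset.inter_eq_left.mpr hBsub]
      have hcore2 : core (papers.toFinset \ batch.toFinset) = core papers.toFinset :=
        core_sdiff batch.toFinset papers.toFinset hBsub hdegb
      have hcsub : (core (papers.toFinset \ batch.toFinset)).card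
          ≤ (papers.toFinset \ batch.toFinset).card :=
        Finset.card_le_card (core_subset _)
      have hfuel' : (PySem.Set.diff papers batch).length + 1 ≤ fuel := by
        have hble : batch.length ≤ papers.length := by
          rw [hbatch]; exact List.length_filter_le _ _
        rw [hlen]; omega
      rw [ih (PySem.Set.diff papers batch) pa (removed + (batch.length : Int)) hnd' hfuel']
      rw [htf] at *
      have hcq : (core (papers.toFinset \ batch.toFinset)).card = (core papers.toFinset).card := by
        rw [hcore2]
      simp only [Prod.mk.injEq]
      exact ⟨by omega, trivial⟩

lemma B_val (d : List (List String)) (pa : Int) :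
    find_accessible_paper_alt d pa = (pa + (((PA d).card - (core (PA d)).card : Nat) : Int), 0) := by
  have hnd : (papersOf d).Nodup := PySem.Set.nodup_ofList _
  have htf : (papersOf d).toFinset = PA d := by
    ext x
    rw [papersOf, PA]
    simp [List.mem_toFinset, PySem.Set.mem_ofList]
  rw [find_accessible_paper_alt]
  show loopB pa ((papersOf d).length + 1) (papersOf d) 0 = _
  rw [loopB_spec ((papersOf d).length + 1) (papersOf d) pa 0 hnd (le_refl _), htf]
  simp

-- ===== VERDICT (by name: the statement is the Claim_ definition above) =====
theorem find_accessible_paper_spec : Claim_equal_find_accessible_paper := by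
  intro data pa _ hpre
  unfold Spec_find_accessible_paper
  rw [A_val data pa (safeUp_of_pre hpre), B_val data pa]
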